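-- pv_equiv track=rewrite | github.com/housewithwindows/goa-homework | level 39/Homework/Day 39 homework 5.py | memesorting
-- ===== SOURCE A (Python) =====
-- def memesorting(meme):
--     Roma = ['b','u','g']
--     Maxim = ['b','o','o','m']
--     Danik = ['e','d','i','t','s']
--     meme = meme.lower()
--     for i in meme:
--         if i == Roma[0]:
--             Roma.remove(i)
--             if not Roma:
--                 return 'Roma'
--         if i == Maxim[0]:
--             Maxim.remove(i)
--             if not Maxim:
--                 return 'Maxim'
--         if i == Danik[0]:
--             Danik.remove(i)
--             if not Danik:
--                 return 'Danik'
--     return 'Vlad'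
-- ===== SOURCE B (Python) =====
-- def memesorting(meme):
--     s = meme.lower()
--
--     def done_at(word):
--         rest = list(word)
--         for i, ch in enumerate(s):
--             if ch == rest[0]:
--                 rest = rest[1:]
--                 if not rest:
--                     return i
--         return None
--
--     best = None  # (completion index, name)
--     for word, name in (('bug', 'Roma'), ('boom', 'Maxim'), ('edits', 'Danik')):
--         idx = done_at(word)
--         if idx is not None and (best is None or idx < best[0]):
--             best = (idx, name)
--     return best[1] if best is not None else 'Vlad'
-- ===== Notes on version B (the rewrite author's own statement) =====
-- stated objective: alternative
-- what changed: Replaces A's single interleaved pass that mutates three remaining-letter lists with three independent greedy subsequence scans returning completion indices, combined by a minimum-index comparison with fixed priority Roma>Maxim>Danik.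
import Mathlib
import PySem

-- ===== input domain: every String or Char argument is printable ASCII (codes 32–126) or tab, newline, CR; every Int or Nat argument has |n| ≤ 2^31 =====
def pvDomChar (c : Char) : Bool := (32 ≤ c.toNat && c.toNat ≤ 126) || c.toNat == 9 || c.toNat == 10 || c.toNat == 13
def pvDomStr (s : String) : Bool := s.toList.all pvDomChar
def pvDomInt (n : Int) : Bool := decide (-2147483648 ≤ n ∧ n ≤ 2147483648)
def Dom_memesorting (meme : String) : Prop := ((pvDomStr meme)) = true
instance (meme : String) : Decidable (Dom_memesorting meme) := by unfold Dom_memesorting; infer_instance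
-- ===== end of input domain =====

-- B replaces A's single interleaved pass over three mutable remaining-letter lists by three
-- independent greedy subsequence scans plus a minimum-completion-index comparison (alternative).

-- ===== PORT A =====
-- one Python if-block: 'if i == W[0]: W.remove(i); if not W: return name' — W[0] match removes the head
def memesortingStep (w : List Char) (c : Char) : List Char × Bool :=
  if w.head? = some c then (w.tail, w.tail.isEmpty) else (w, false)

def memesortingLoop (ra ma da : List Char) : List Char → String
  | [] => "Vlad"
  | c :: cs =>
    let r := memesortingStep ra c
    if r.2 then "Roma" else
    let m := memesortingStep ma c
    if m.2 then "Maxim" else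
    let d := memesortingStep da c
    if d.2 then "Danik" else
    memesortingLoop r.1 m.1 d.1 cs

def memesorting (meme : String) : String :=
  memesortingLoop ['b','u','g'] ['b','o','o','m'] ['e','d','i','t','s']
    (PySem.Str.lower meme).toList

-- ===== PORT B =====
-- done_at: greedy scan, returns the index at which 'rest' is completed as a subsequence
def memesortingDoneAt (rest : List Char) (i : Nat) : List Char → Option Nat
  | [] => none
  | c :: cs =>
    if rest.head? = some c then
      if rest.tail.isEmpty then some i
      else memesortingDoneAt rest.tail (i + 1) cs
    else memesortingDoneAt rest (i + 1) cs

-- the 'for word, name … if idx is not None and (best is None or idx < best[0])' fold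
def memesortingBest (cands : List (Option Nat × String)) : String :=
  let best := cands.foldl (fun acc p =>
    match p.1 with
    | none => acc
    | some i =>
      match acc with
      | none => some (i, p.2)
      | some b => if i < b.1 then some (i, p.2) else acc) none
  match best with
  | some b => b.2
  | none => "Vlad"

def memesorting_alt (meme : String) : String :=
  let s := (PySem.Str.lower meme).toList
  memesortingBest [(memesortingDoneAt ['b','u','g'] 0 s, "Roma"),
                   (memesortingDoneAt ['b','o','o','m'] 0 s, "Maxim"),
                   (memesortingDoneAt ['e','d','i','t','s'] 0 s, "Danik")]

-- ===== PRECONDITION & SPEC =====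
def Spec_memesorting (meme : String) (out : String) : Prop := out = memesorting_alt meme
instance (meme : String) (out : String) : Decidable (Spec_memesorting meme out) := by unfold Spec_memesorting; infer_instance

-- ===== CLAIM (what is proved, stated in full; the proofs are below) =====
def Claim_equal_memesorting : Prop := ∀ (meme : String), Dom_memesorting meme → Spec_memesorting meme (memesorting meme)

-- ===== LEMMAS AND PROOFS =====

theorem memesortingDoneAt_ge {w : List Char} {i j : Nat} {cs : List Char}
    (h : memesortingDoneAt w i cs = some j) : i ≤ j := by
  induction cs generalizing w i with
  | nil => simp [memesortingDoneAt] at h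
  | cons c cs ih =>
    unfold memesortingDoneAt at h
    split_ifs at h with h1 h2
    · exact Nat.le_of_eq (Option.some.inj h)
    · exact Nat.le_of_succ_le (ih h)
    · exact Nat.le_of_succ_le (ih h)

theorem memesortingBest_roma {i : Nat} {m d : Option Nat}
    (hm : ∀ j, m = some j → ¬ j < i) (hd : ∀ k, d = some k → ¬ k < i) :
    memesortingBest [(some i, "Roma"), (m, "Maxim"), (d, "Danik")] = "Roma" := by
  cases m with
  | none => cases d with
    | none => simp [memesortingBest, List.foldl]
    | some k => simp [memesortingBest, List.foldl, hd k rfl]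
  | some j => cases d with
    | none => simp [memesortingBest, List.foldl, hm j rfl]
    | some k => simp [memesortingBest, List.foldl, hm j rfl, hd k rfl]

theorem memesortingBest_maxim {i : Nat} {r d : Option Nat}
    (hr : ∀ j, r = some j → i < j) (hd : ∀ k, d = some k → ¬ k < i) :
    memesortingBest [(r, "Roma"), (some i, "Maxim"), (d, "Danik")] = "Maxim" := by
  cases r with
  | none => cases d with
    | none => simp [memesortingBest, List.foldl]
    | some k => simp [memesortingBest, List.foldl, hd k rfl]
  | some j => cases d with
    | none => simp [memesortingBest, List.foldl, hr j rfl]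
    | some k => simp [memesortingBest, List.foldl, hr j rfl, hd k rfl]

theorem memesortingBest_danik {i : Nat} {r m : Option Nat}
    (hr : ∀ j, r = some j → i < j) (hm : ∀ j, m = some j → i < j) :
    memesortingBest [(r, "Roma"), (m, "Maxim"), (some i, "Danik")] = "Danik" := by
  cases r with
  | none => cases m with
    | none => simp [memesortingBest, List.foldl]
    | some j => simp [memesortingBest, List.foldl, hm j rfl]
  | some j => cases m with
    | none => simp [memesortingBest, List.foldl, hr j rfl]
    | some k =>
      have h1 := hr j rfl
      have h2 := hm k rfl
      by_cases hkj : k < j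
      · simp [memesortingBest, List.foldl, hkj, h2]
      · simp [memesortingBest, List.foldl, hkj, h1]

theorem memesortingStep_done (w : List Char) (c : Char) (hw : w ≠ []) :
    ∀ (i : Nat) (cs : List Char),
    memesortingDoneAt w i (c :: cs) =
      if (memesortingStep w c).2 then some i
      else memesortingDoneAt (memesortingStep w c).1 (i + 1) cs := by
  intro i cs
  obtain ⟨a, t, rfl⟩ := List.exists_cons_of_ne_nil hw
  by_cases h1 : a = c <;> by_cases h2 : t = [] <;>
    simp [memesortingDoneAt, memesortingStep, h1, h2]

theorem memesortingStep_ne_nil (w : List Char) (c : Char) (hw : w ≠ [])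
    (h : (memesortingStep w c).2 = false) : (memesortingStep w c).1 ≠ [] := by
  obtain ⟨a, t, rfl⟩ := List.exists_cons_of_ne_nil hw
  by_cases h1 : a = c <;> simp_all [memesortingStep]

theorem memesortingLoop_eq (cs : List Char) : ∀ (ra ma da : List Char) (i : Nat),
    ra ≠ [] → ma ≠ [] → da ≠ [] →
    memesortingLoop ra ma da cs =
      memesortingBest [(memesortingDoneAt ra i cs, "Roma"),
                       (memesortingDoneAt ma i cs, "Maxim"),
                       (memesortingDoneAt da i cs, "Danik")] := by
  induction cs with
  | nil => intros; simp [memesortingLoop, memesortingDoneAt, memesortingBest, List.foldl]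
  | cons c cs ih =>
    intro ra ma da i hra hma hda
    have hge1 : ∀ (w : List Char) (j : Nat),
        memesortingDoneAt w (i + 1) cs = some j → i < j := by
      intro w j h
      have := memesortingDoneAt_ge h
      omega
    have hnd : ∀ (w : List Char), w ≠ [] → ∀ j,
        (if (memesortingStep w c).2 then some i
         else memesortingDoneAt (memesortingStep w c).1 (i + 1) cs) = some j → ¬ j < i := by
      intro w _ j h
      split at h
      · cases h; omega
      · have := hge1 _ _ h; omega
    rw [memesortingStep_done _ _ hra, memesortingStep_done _ _ hma, memesortingStep_done _ _ hda]
    by_cases hr2 : (memesortingStep ra c).2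
    · rw [show memesortingLoop ra ma da (c :: cs) = "Roma" by
        simp [memesortingLoop, hr2], if_pos hr2]
      exact (memesortingBest_roma (hnd _ hma) (hnd _ hda)).symm
    · have hr2' : (memesortingStep ra c).2 = false := by simpa using hr2
      by_cases hm2 : (memesortingStep ma c).2
      · rw [show memesortingLoop ra ma da (c :: cs) = "Maxim" by
          simp [memesortingLoop, hr2, hm2], if_pos hm2, if_neg hr2]
        exact (memesortingBest_maxim (hge1 _) (hnd _ hda)).symm
      · have hm2' : (memesortingStep ma c).2 = false := by simpa using hm2
        by_cases hd2 : (memesortingStep da c).2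
        · rw [show memesortingLoop ra ma da (c :: cs) = "Danik" by
            simp [memesortingLoop, hr2, hm2, hd2], if_pos hd2, if_neg hr2, if_neg hm2]
          exact (memesortingBest_danik (hge1 _) (hge1 _)).symm
        · have hd2' : (memesortingStep da c).2 = false := by simpa using hd2
          rw [show memesortingLoop ra ma da (c :: cs) =
              memesortingLoop (memesortingStep ra c).1 (memesortingStep ma c).1 (memesortingStep da c).1 cs by
            simp [memesortingLoop, hr2, hm2, hd2], if_neg hr2, if_neg hm2, if_neg hd2]
          exact ih _ _ _ (i + 1) (memesortingStep_ne_nil _ _ hra hr2')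
            (memesortingStep_ne_nil _ _ hma hm2') (memesortingStep_ne_nil _ _ hda hd2')

-- ===== VERDICT (by name: the statement is the Claim_ definition above) =====
theorem memesorting_spec : Claim_equal_memesorting := by
  intro meme _
  unfold Spec_memesorting memesorting memesorting_alt
  exact memesortingLoop_eq _ _ _ _ 0 (by simp) (by simp) (by simp)
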